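-- pv_equiv track=rewrite | github.com/yanzeyu-csu/SigBridgeR | inst/DEGAS_tools/dev/0-build_scripts.py | _clean_utils_content
-- ===== SOURCE A (Python) =====
-- def _clean_utils_content(content):
--     """
--     Clean up the contents of the utils file by removing the top-level docstring
--     while retaining the import statements
--     """
--
--     lines = content.split("\n")
--     result_lines = []
--     in_docstring = False
--     docstring_removed = False
--     skip_empty = True  # Skip the initial blank lines.
--
--     for line in lines:
--         if skip_empty:
--             if line.strip() == "":
--                 continue
--             skip_empty = False
--
--         # skip the first docstring
--         if not docstring_removed and '"""' in line:
--             if not in_docstring: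
--                 in_docstring = True
--                 continue
--             else:
--                 in_docstring = False
--                 docstring_removed = True
--                 continue
--
--         if in_docstring and not docstring_removed:
--             continue
--
--         result_lines.append(line)
--
--     # Remove the excess blank lines at the beginning
--     while result_lines and result_lines[0].strip() == "":
--         result_lines.pop(0)
--
--     return "\n".join(result_lines)
-- ===== SOURCE B (Python) =====
-- def _drop_leading_blank(lines):
--     k = 0
--     while k < len(lines) and lines[k].strip() == "":
--         k += 1
--     return lines[k:]
--
--
-- def _clean_utils_content(content):
--     lines = _drop_leading_blank(content.split("\n"))
--     i = next((k for k, ln in enumerate(lines) if '"""' in ln), None)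
--     if i is None:
--         body = lines
--     else:
--         rest = lines[i + 1:]
--         j = next((k for k, ln in enumerate(rest) if '"""' in ln), None)
--         body = lines[:i] + (rest[j + 1:] if j is not None else [])
--     return "\n".join(_drop_leading_blank(body))
-- ===== Notes on version B (the rewrite author's own statement) =====
-- stated objective: simpler
-- what changed: Replaces the per-line four-flag state machine with explicit boundary finding: drop leading blanks, locate the first two lines containing the triple-quote marker, slice that docstring range out, drop leading blanks again and join.
import Mathlib
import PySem

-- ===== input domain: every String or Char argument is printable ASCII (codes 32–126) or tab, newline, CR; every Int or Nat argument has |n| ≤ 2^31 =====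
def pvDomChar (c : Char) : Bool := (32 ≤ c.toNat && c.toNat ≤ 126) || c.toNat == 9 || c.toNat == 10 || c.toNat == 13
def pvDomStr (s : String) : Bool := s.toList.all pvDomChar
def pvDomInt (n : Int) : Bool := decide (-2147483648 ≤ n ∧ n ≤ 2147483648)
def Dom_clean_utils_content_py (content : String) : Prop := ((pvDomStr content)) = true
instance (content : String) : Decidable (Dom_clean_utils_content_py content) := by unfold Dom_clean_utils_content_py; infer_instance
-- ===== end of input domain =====

-- B replaces A's per-line flag state machine by boundary finding and slicing (objective: simpler); same O(n) cost.

-- '"""' in line  (used verbatim by both Pythons)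
def pvHasQ (line : String) : Bool := PySem.Str.isIn "\"\"\"" line

-- line.strip() == ""
def pvBlank (line : String) : Bool := PySem.Str.strip line == ""

-- ===== PORT A =====
-- state = (result_lines, in_docstring, docstring_removed, skip_empty)
def pvStepA (st : List String × Bool × Bool × Bool) (line : String) :
    List String × Bool × Bool × Bool :=
  let (acc, in_d, rem, skip) := st
  if skip && pvBlank line then st              -- 'continue' keeping skip_empty
  else                                          -- skip_empty = False from here on
    if !rem && pvHasQ line then
      if !in_d then (acc, true, rem, false)     -- opener: continue
      else (acc, false, true, false)            -- closer: continue
    else if in_d && !rem then (acc, in_d, rem, false)  -- inside docstring: continue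
    else (acc ++ [line], in_d, rem, false)      -- result_lines.append(line)

def clean_utils_content_py (content : String) : String :=
  let lines := (PySem.Str.split? content "\n").getD []
  let st := lines.foldl pvStepA ([], false, false, true)
  -- while result_lines and result_lines[0].strip() == "": result_lines.pop(0)
  let res := st.1.dropWhile pvBlank
  PySem.Str.join "\n" res

-- ===== PORT B =====
-- _drop_leading_blank: while k < len(lines) and lines[k].strip() == "": k += 1; return lines[k:]
def pvDropLeadingBlank : List String → List String
  | [] => []
  | l :: rest => if pvBlank l then pvDropLeadingBlank rest else l :: rest

def clean_utils_content_py_alt (content : String) : String :=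
  let lines := pvDropLeadingBlank ((PySem.Str.split? content "\n").getD [])
  let body :=
    match lines.findIdx? (fun ln => pvHasQ ln) with
    | none => lines
    | some i =>
      let rest := lines.drop (i + 1)
      let tail :=
        match rest.findIdx? (fun ln => pvHasQ ln) with
        | none => []
        | some j => rest.drop (j + 1)
      lines.take i ++ tail
  PySem.Str.join "\n" (pvDropLeadingBlank body)

-- ===== PRECONDITION & SPEC =====
def Spec_clean_utils_content_py (content : String) (out : String) : Prop := out = clean_utils_content_py_alt content
instance (content : String) (out : String) : Decidable (Spec_clean_utils_content_py content out) := by unfold Spec_clean_utils_content_py; infer_instance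

-- ===== CLAIM (what is proved, stated in full; the proofs are below) =====
def Claim_equal_clean_utils_content_py : Prop := ∀ (content : String), Dom_clean_utils_content_py content → Spec_clean_utils_content_py content (clean_utils_content_py content)

-- ===== LEMMAS AND PROOFS =====

-- once docstring_removed is set, the loop just appends every remaining line
theorem pv_fold_rem (ls : List String) (acc : List String) (d : Bool) :
    ls.foldl pvStepA (acc, d, true, false) = (acc ++ ls, d, true, false) := by
  induction ls generalizing acc with
  | nil => simp
  | cons l rest ih =>
      simp only [List.foldl_cons, pvStepA]
      by_cases h : pvHasQ l = true <;> simp [h, ih]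

-- inside the docstring: skip until the closing '"""' line, then append the rest
theorem pv_fold_in (ls : List String) (acc : List String) :
    ls.foldl pvStepA (acc, true, false, false) =
      match ls.findIdx? (fun ln => pvHasQ ln) with
      | none => (acc, true, false, false)
      | some j => (acc ++ ls.drop (j + 1), false, true, false) := by
  induction ls generalizing acc with
  | nil => simp
  | cons l rest ih =>
      simp only [List.foldl_cons, pvStepA, List.findIdx?_cons]
      by_cases h : pvHasQ l = true
      · simp [h, pv_fold_rem]
      · simp only [h, Bool.false_eq_true, if_false, Bool.not_false, Bool.true_and,
          Bool.and_self, if_true, Bool.false_and]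
        rw [ih]
        cases rest.findIdx? (fun ln => pvHasQ ln) <;> simp

-- scanning before the docstring: append until the opening '"""' line
theorem pv_fold_scan (ls : List String) (acc : List String) :
    (ls.foldl pvStepA (acc, false, false, false)).1 =
      match ls.findIdx? (fun ln => pvHasQ ln) with
      | none => acc ++ ls
      | some i =>
        match (ls.drop (i + 1)).findIdx? (fun ln => pvHasQ ln) with
        | none => acc ++ ls.take i
        | some j => acc ++ ls.take i ++ (ls.drop (i + 1)).drop (j + 1) := by
  induction ls generalizing acc with
  | nil => simp
  | cons l rest ih =>
      simp only [List.foldl_cons, pvStepA, List.findIdx?_cons]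
      by_cases h : pvHasQ l = true
      · simp only [h, if_true, Bool.not_false, Bool.true_and, Bool.false_and,
          Bool.false_eq_true, if_false]
        rw [pv_fold_in]
        cases hf : rest.findIdx? (fun ln => pvHasQ ln) <;> simp [hf]
      · simp only [h, Bool.false_eq_true, if_false, Bool.and_false, Bool.false_and]
        rw [ih]

        cases hf : rest.findIdx? (fun ln => pvHasQ ln) with
        | none => simp [hf]
        | some i =>
            simp only [Option.map_some]
            cases hg : (rest.drop (i + 1)).findIdx? (fun ln => pvHasQ ln) <;> simp [hg]

-- the skip_empty phase drops the leading blank lines before the scanning phase starts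
theorem pv_fold_skip (ls : List String) :
    (ls.foldl pvStepA ([], false, false, true)).1 =
      ((ls.dropWhile pvBlank).foldl pvStepA ([], false, false, false)).1 := by
  induction ls with
  | nil => rfl
  | cons l rest ih =>
      by_cases h : pvBlank l = true
      · simpa [List.foldl_cons, List.dropWhile_cons, h, pvStepA] using ih
      · simp only [List.dropWhile_cons, h, Bool.false_eq_true, if_false, List.foldl_cons]
        congr 2
        simp [pvStepA, h]

theorem pv_dropLeadingBlank_eq (ls : List String) :
    pvDropLeadingBlank ls = ls.dropWhile pvBlank := by
  induction ls with
  | nil => rfl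
  | cons l rest ih =>
      by_cases h : pvBlank l = true <;> simp [pvDropLeadingBlank, h, ih]

-- both results as a function of the line list, proved equal
theorem pv_main (ls : List String) :
    (ls.foldl pvStepA ([], false, false, true)).1.dropWhile pvBlank =
      pvDropLeadingBlank
        (let lines := pvDropLeadingBlank ls
         match lines.findIdx? (fun ln => pvHasQ ln) with
         | none => lines
         | some i =>
           let rest := lines.drop (i + 1)
           let tail :=
             match rest.findIdx? (fun ln => pvHasQ ln) with
             | none => []
             | some j => rest.drop (j + 1)
           lines.take i ++ tail) := by
  rw [pv_fold_skip, pv_fold_scan, pv_dropLeadingBlank_eq, pv_dropLeadingBlank_eq]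
  cases hf : (ls.dropWhile pvBlank).findIdx? (fun ln => pvHasQ ln) with
  | none => simp [hf]
  | some i =>
      cases hg : ((ls.dropWhile pvBlank).drop (i + 1)).findIdx? (fun ln => pvHasQ ln) <;>
        simp [hf, hg]

-- ===== VERDICT (by name: the statement is the Claim_ definition above) =====
theorem clean_utils_content_py_spec : Claim_equal_clean_utils_content_py := by
  intro content _
  unfold Spec_clean_utils_content_py clean_utils_content_py clean_utils_content_py_alt
  exact congrArg (PySem.Str.join "\n") (pv_main _)
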